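-- pv_equiv track=rewrite | github.com/Quin-Darcy/GroupTheorey | group.py | get_Coors
-- ===== SOURCE A (Python) =====
-- def get_Coors(Sn, n):
--     L = len(Sn)
--     coors = [[0]*n for i in range(L)]
--     for i in range(L):
--         for j in range(n):
--             k = abs(Sn[i][j]-j)
--             coors[i][j] = ((-1)**(k))*(get_Prime(Sn[i][j])+k)**(j+1)
--     return coors
--
-- def get_Prime(n):
--     val = False
--     p = 2
--     count = 1
--     num = 0
--     PrimeCount = 0
--     while (val != True):
--         for i in range(1, p+1):
--             if (p%i == 0):
--                 num += 1
--         if (num > 2):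
--             p += 1
--         else:
--             PrimeCount += 1
--             p += 1
--         if (PrimeCount == n):
--             val = True
--         else:
--             val = False
--         num = 0
--         count += 1
--     return p-1
-- ===== SOURCE B (Python) =====
-- def _is_prime(p):
--     d = 2
--     while d * d <= p:
--         if p % d == 0:
--             return False
--         d += 1
--     return True
--
--
-- def _first_primes(m):
--     # list of the first m primes, computed once
--     primes = []
--     p = 2
--     while len(primes) < m:
--         if _is_prime(p):
--             primes.append(p)
--         p += 1
--     return primes
--
--
-- def get_Coors(Sn, n):
--     # largest prime index needed anywhere in the matrix
--     m = 0
--     for row in Sn: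
--         for v in row[:max(n, 0)]:
--             if v > m:
--                 m = v
--     primes = _first_primes(m)
--     return [[(-1) ** abs(row[j] - j) * (primes[row[j] - 1] + abs(row[j] - j)) ** (j + 1)
--              for j in range(n)]
--             for row in Sn]
-- ===== Notes on version B (the rewrite author's own statement) =====
-- stated objective: alternative
-- what changed: B computes the table of the first max-entry primes once (trial division only up to sqrt with early exit) and looks each entry's prime up in that table, instead of A's recomputation of the nth prime for every matrix entry by counting all divisors of every candidate number.
import Mathlib
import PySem

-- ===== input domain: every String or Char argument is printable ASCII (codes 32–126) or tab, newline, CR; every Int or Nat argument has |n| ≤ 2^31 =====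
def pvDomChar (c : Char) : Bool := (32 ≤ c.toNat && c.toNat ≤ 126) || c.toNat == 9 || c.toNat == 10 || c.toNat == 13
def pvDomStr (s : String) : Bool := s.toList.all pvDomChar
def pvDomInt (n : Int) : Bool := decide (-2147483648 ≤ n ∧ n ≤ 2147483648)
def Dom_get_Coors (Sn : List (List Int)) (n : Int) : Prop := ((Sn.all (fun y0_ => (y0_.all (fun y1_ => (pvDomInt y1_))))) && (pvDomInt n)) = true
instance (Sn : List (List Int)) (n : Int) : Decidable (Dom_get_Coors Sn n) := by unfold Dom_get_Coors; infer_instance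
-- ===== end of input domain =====

-- B precomputes the table of the first max(Sn)-many primes once (sqrt-bounded trial
-- division) and reuses it for every entry, instead of A's per-entry recomputation of
-- the nth prime by counting all divisors of every candidate.  Objective: alternative.

-- ===== PORT A =====
-- inner 'for i in range(1, p+1): if p % i == 0: num += 1' of get_Prime
def aDivNum (p : Int) : Int :=
  (PySem.List.pyRange 1 (p + 1) 1).foldl
    (fun num i => if PySem.Int.mod p i = 0 then num + 1 else num) 0

-- the 'while (val != True)' loop of get_Prime; fuel only makes the loop total
-- (2^(n+1) steps always suffice, proved below); on fuel 0 it returns p-1 (unreachable under Pre_)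
def aLoop : Nat → Int → Int → Int → Int
  | 0, _, p, _ => p - 1
  | fuel + 1, n, p, primeCount =>
    let num := aDivNum p
    let (p', c') := if num > 2 then (p + 1, primeCount) else (p + 1, primeCount + 1)
    if c' = n then p' - 1 else aLoop fuel n p' c'

def get_Prime (n : Int) : Int := aLoop (2 ^ (n.toNat + 1)) n 2 0

def get_Coors (Sn : List (List Int)) (n : Int) : List (List Int) :=
  let L : Int := Sn.length
  -- coors = [[0]*n for i in range(L)]
  let coors0 : List (List Int) := (PySem.List.pyRange 0 L 1).map (fun _ => List.replicate n.toNat 0)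
  -- for i in range(L): for j in range(n): coors[i][j] = (-1)**k * (get_Prime(Sn[i][j])+k)**(j+1)
  (PySem.List.pyRange 0 L 1).foldl (fun coors i =>
    (PySem.List.pyRange 0 n 1).foldl (fun coors j =>
      let v := PySem.List.pyGetD (PySem.List.pyGetD Sn i []) j 0
      let k := |v - j|
      coors.set i.toNat ((PySem.List.pyGetD coors i []).set j.toNat
        ((-1) ^ k.toNat * (get_Prime v + k) ^ (j + 1).toNat))) coors) coors0

-- ===== PORT B =====
-- _is_prime: trial division while d*d <= p
def bIsPrimeLoop (p d : Nat) : Bool :=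
  if h : d * d ≤ p then
    if p % d = 0 then false else bIsPrimeLoop p (d + 1)
  else true
termination_by p + 1 - d
decreasing_by
  rcases Nat.eq_zero_or_pos d with h0 | h0
  · omega
  · have := Nat.le_mul_of_pos_left d h0; omega

def bIsPrime (p : Nat) : Bool := bIsPrimeLoop p 2

-- _first_primes: while len(primes) < m: if _is_prime(p): primes.append(p); p += 1
-- (fuel only makes the while loop total; 2^(m+1) steps always suffice, proved below)
def bLoop : Nat → Nat → Nat → List Nat → List Nat
  | 0, _, _, primes => primes
  | fuel + 1, m, p, primes =>
    if primes.length < m then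
      bLoop fuel m (p + 1) (if bIsPrime p then primes ++ [p] else primes)
    else primes

def bFirstPrimes (m : Nat) : List Nat := bLoop (2 ^ (m + 1)) m 2 []

def get_Coors_alt (Sn : List (List Int)) (n : Int) : List (List Int) :=
  -- m = running max over row[:max(n, 0)]
  let m : Int := Sn.foldl (fun m row =>
    (PySem.List.slice row none (some (max n 0))).foldl
      (fun m v => if v > m then v else m) m) 0
  let primes : List Int := (bFirstPrimes m.toNat).map (fun (p : Nat) => (p : Int))
  Sn.map (fun row =>
    (PySem.List.pyRange 0 n 1).map (fun j =>
      let v := PySem.List.pyGetD row j 0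
      let k := |v - j|
      (-1) ^ k.toNat * (PySem.List.pyGetD primes (v - 1) 0 + k) ^ (j + 1).toNat))

-- ===== PRECONDITION & SPEC =====
-- Pre_ excludes exactly the inputs where the Python A does not return: rows shorter
-- than n (IndexError on Sn[i][j]) and entries < 1 among the first n columns
-- (get_Prime(v) loops forever for v <= 0).
def Pre_get_Coors (Sn : List (List Int)) (n : Int) : Prop :=
  ∀ row ∈ Sn, n.toNat ≤ row.length ∧ ∀ v ∈ row.take n.toNat, 1 ≤ v
instance (Sn : List (List Int)) (n : Int) : Decidable (Pre_get_Coors Sn n) := by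
  unfold Pre_get_Coors; infer_instance

def pvWitness_get_Coors : List (List Int) × Int := ([[1, 2], [2, 1]], 2)

def Spec_get_Coors (Sn : List (List Int)) (n : Int) (out : List (List Int)) : Prop := out = get_Coors_alt Sn n
instance (Sn : List (List Int)) (n : Int) (out : List (List Int)) : Decidable (Spec_get_Coors Sn n out) := by unfold Spec_get_Coors; infer_instance

-- ===== CLAIM (what is proved, stated in full; the proofs are below) =====
def Claim_equal_get_Coors : Prop := ∀ (Sn : List (List Int)) (n : Int), Dom_get_Coors Sn n → Pre_get_Coors Sn n → Spec_get_Coors Sn n (get_Coors Sn n)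

-- ===== LEMMAS AND PROOFS =====

-- ---- number theory shared by both proofs: A's divisor count and B's trial division both detect primality ----

theorem pvNthPrimeLeTwoPow (k : Nat) : Nat.nth Nat.Prime k ≤ 2 ^ (k + 1) := by
  induction k with
  | zero => rw [Nat.nth_prime_zero_eq_two]; norm_num
  | succ k ih =>
    have hpos : Nat.nth Nat.Prime k ≠ 0 := (Nat.prime_nth_prime k).pos.ne'
    obtain ⟨q, hq, hlt, hle⟩ := Nat.exists_prime_lt_and_le_two_mul _ hpos
    have hcq : k + 2 ≤ Nat.count Nat.Prime (q + 1) := by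
      have h1 : Nat.count Nat.Prime (Nat.nth Nat.Prime k + 1) = k + 1 :=
        Nat.count_nth_succ_of_infinite Nat.infinite_setOf_prime k
      have h2 : Nat.count Nat.Prime (q + 1) = Nat.count Nat.Prime q + 1 := by
        rw [Nat.count_succ, if_pos hq]
      have h3 : Nat.count Nat.Prime (Nat.nth Nat.Prime k + 1) ≤ Nat.count Nat.Prime q :=
        Nat.count_monotone _ (by omega)
      omega
    have hnext : Nat.nth Nat.Prime (k + 1) < q + 1 := Nat.nth_lt_of_lt_count (by omega)
    have hb : q ≤ 2 ^ (k + 2) := by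
      calc q ≤ 2 * Nat.nth Nat.Prime k := hle
        _ ≤ 2 * 2 ^ (k + 1) := by omega
        _ = 2 ^ (k + 2) := by ring
    omega

theorem pvADivNumEq (P : Nat) :
    aDivNum (P : Int) = ((List.range' 1 P).countP (fun x => decide (x ∣ P)) : Int) := by
  unfold aDivNum
  rw [PySem.List.foldl_ite_add_one]
  have h1 : PySem.List.pyRange 1 ((P : Int) + 1) 1 = (List.range P).map (fun k : Nat => (1 : Int) + k) := by
    rw [PySem.List.pyRange_one]; norm_num
  rw [h1, List.countP_map, List.range'_eq_map_range, List.countP_map]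
  rw [zero_add, Int.natCast_inj]
  apply List.countP_congr
  intro k _
  simp only [Function.comp_apply, decide_eq_true_eq, PySem.Int.mod_eq_zero_iff_dvd]
  rw [show (1 : Int) + (k : Int) = ((1 + k : Nat) : Int) by push_cast; ring]
  exact_mod_cast Iff.rfl

theorem pvDivisorsGtTwo (P : Nat) (h2 : 2 ≤ P) :
    (2 < (List.range' 1 P).countP (fun x => decide (x ∣ P))) ↔ ¬ P.Prime := by
  set l := (List.range' 1 P).filter (fun x => decide (x ∣ P)) with hl
  have hcount : (List.range' 1 P).countP (fun x => decide (x ∣ P)) = l.length :=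
    List.countP_eq_length_filter
  have hnd : l.Nodup := (List.nodup_range').filter _
  have hcard : l.toFinset.card = l.length := List.toFinset_card_of_nodup hnd
  constructor
  · intro hgt hP
    have hsub : l.toFinset ⊆ ({1, P} : Finset ℕ) := by
      intro x hx
      simp only [List.mem_toFinset, hl, List.mem_filter, List.mem_range'_1, decide_eq_true_eq] at hx
      have := Nat.Prime.eq_one_or_self_of_dvd hP x hx.2
      simp [this]
    have := Finset.card_le_card hsub
    have hle : ({1, P} : Finset ℕ).card ≤ 2 := Finset.card_insert_le _ _ |>.trans (by simp)
    omega
  · intro hP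
    obtain ⟨m, hmdvd, hm2, hmP⟩ := Nat.exists_dvd_of_not_prime2 h2 hP
    have hsub : ({1, m, P} : Finset ℕ) ⊆ l.toFinset := by
      intro x hx
      simp only [Finset.mem_insert, Finset.mem_singleton] at hx
      simp only [List.mem_toFinset, hl, List.mem_filter, List.mem_range'_1, decide_eq_true_eq]
      rcases hx with rfl | rfl | rfl
      · exact ⟨⟨le_refl _, by omega⟩, one_dvd _⟩
      · exact ⟨⟨by omega, by omega⟩, hmdvd⟩
      · exact ⟨⟨by omega, by omega⟩, dvd_refl _⟩
    have hc3 : ({1, m, P} : Finset ℕ).card = 3 := by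
      rw [Finset.card_insert_of_notMem (by simp; omega),
        Finset.card_insert_of_notMem (by simp; omega), Finset.card_singleton]
    have := Finset.card_le_card hsub
    omega

theorem pvADivNumGtTwo (P : Nat) (h2 : 2 ≤ P) : (2 < aDivNum (P : Int)) ↔ ¬ P.Prime := by
  rw [pvADivNumEq, ← pvDivisorsGtTwo P h2]
  exact_mod_cast Iff.rfl

-- ---- A's prime loop returns the nth prime ----

theorem pvALoopSpec (fuel : Nat) : ∀ (P C N : Nat), 2 ≤ P → C = Nat.count Nat.Prime P → C < N →
    N ≤ Nat.count Nat.Prime (P + fuel) →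
    aLoop fuel (N : Int) (P : Int) (C : Int) = (Nat.nth Nat.Prime (N - 1) : Int) := by
  induction fuel with
  | zero =>
    intro P C N h2 hC hCN hfuel
    exfalso; rw [Nat.add_zero] at hfuel; omega
  | succ f ih =>
    intro P C N h2 hC hCN hfuel
    by_cases hp : 2 < aDivNum (P : Int)
    · have hnpr : ¬ P.Prime := (pvADivNumGtTwo P h2).1 hp
      have hcnt : Nat.count Nat.Prime (P + 1) = C := by
        rw [Nat.count_succ, if_neg hnpr]; omega
      have hne : ¬ ((C : Int) = (N : Int)) := by exact_mod_cast Nat.ne_of_lt hCN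
      show aLoop (f + 1) _ _ _ = _
      simp only [aLoop, if_pos hp, if_neg hne]
      have := ih (P + 1) C N (by omega) hcnt.symm hCN (by
        have : P + 1 + f = P + (f + 1) := by omega
        rw [this]; exact hfuel)
      rw [show (P : Int) + 1 = ((P + 1 : Nat) : Int) by push_cast; ring]
      exact this
    · have hpr : P.Prime := by
        by_contra hn
        exact hp ((pvADivNumGtTwo P h2).2 hn)
      have hcnt : Nat.count Nat.Prime (P + 1) = C + 1 := by
        rw [Nat.count_succ, if_pos hpr]; omega
      show aLoop (f + 1) _ _ _ = _
      by_cases heq : C + 1 = N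
      · have heqI : ((C : Int) + 1 = (N : Int)) := by exact_mod_cast heq
        simp only [aLoop, if_neg hp, if_pos heqI]
        have hnth : Nat.nth Nat.Prime (N - 1) = P := by
          have : Nat.count Nat.Prime P = N - 1 := by omega
          rw [← this]
          exact Nat.nth_count hpr
        rw [hnth]; ring
      · have hneI : ¬ ((C : Int) + 1 = (N : Int)) := by exact_mod_cast heq
        simp only [aLoop, if_neg hp, if_neg hneI]
        have := ih (P + 1) (C + 1) N (by omega) hcnt.symm (by omega) (by
          have : P + 1 + f = P + (f + 1) := by omega
          rw [this]; exact hfuel)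
        rw [show (P : Int) + 1 = ((P + 1 : Nat) : Int) by push_cast; ring,
            show (C : Int) + 1 = ((C + 1 : Nat) : Int) by push_cast; ring]
        exact this

theorem pvGetPrimeEq (v : Int) (hv : 1 ≤ v) :
    get_Prime v = (Nat.nth Nat.Prime (v.toNat - 1) : Int) := by
  unfold get_Prime
  have hN : v = ((v.toNat : Nat) : Int) := by omega
  rw [hN, show (0 : Int) = ((0 : Nat) : Int) from rfl, show (2 : Int) = ((2 : Nat) : Int) from rfl]
  apply pvALoopSpec
  · norm_num
  · decide
  · omega
  · have h1 : Nat.count Nat.Prime (Nat.nth Nat.Prime (v.toNat - 1) + 1) = v.toNat := by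
      rw [Nat.count_nth_succ_of_infinite Nat.infinite_setOf_prime]
      omega
    have h2 : Nat.nth Nat.Prime (v.toNat - 1) ≤ 2 ^ (v.toNat - 1 + 1) := pvNthPrimeLeTwoPow _
    have h3 : (2 : Nat) ^ (v.toNat - 1 + 1) ≤ 2 ^ (v.toNat + 1) :=
      Nat.pow_le_pow_right (by norm_num) (by omega)
    have hmono : Nat.count Nat.Prime (Nat.nth Nat.Prime (v.toNat - 1) + 1)
        ≤ Nat.count Nat.Prime (2 + 2 ^ (v.toNat + 1)) := Nat.count_monotone _ (by omega)
    simp only [Int.toNat_natCast]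
    omega

-- ---- B's trial division and prime table ----

theorem pvBIsPrimeLoopEq (p d : Nat) :
    bIsPrimeLoop p d = true ↔ ∀ e, d ≤ e → e * e ≤ p → ¬ e ∣ p := by
  induction d using bIsPrimeLoop.induct p with
  | case1 d h hdvd =>
    rw [bIsPrimeLoop]
    simp only [dif_pos h, if_pos hdvd, Bool.false_eq_true, false_iff]
    intro hall
    exact hall d le_rfl h (Nat.dvd_of_mod_eq_zero hdvd)
  | case2 d h hdvd ih =>
    rw [bIsPrimeLoop]
    simp only [dif_pos h, if_neg hdvd]
    rw [ih]
    constructor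
    · intro hall e he hee
      rcases Nat.eq_or_lt_of_le he with rfl | hlt
      · intro hd; exact hdvd (Nat.mod_eq_zero_of_dvd hd)
      · exact hall e hlt hee
    · intro hall e he hee
      exact hall e (by omega) hee
  | case3 d h =>
    rw [bIsPrimeLoop]
    simp only [dif_neg h, true_iff]
    intro e he hee hdvd
    exact h (by nlinarith)

theorem pvBIsPrimeEq (p : Nat) (h2 : 2 ≤ p) : bIsPrime p = true ↔ p.Prime := by
  rw [bIsPrime, pvBIsPrimeLoopEq, Nat.prime_def_le_sqrt]
  constructor
  · intro hall
    exact ⟨h2, fun m hm hms => hall m hm (Nat.le_sqrt.1 hms)⟩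
  · rintro ⟨-, hall⟩ e he hee
    exact hall e he (Nat.le_sqrt.2 hee)

theorem pvBLoopSpec (fuel : Nat) : ∀ (P m : Nat) (primes : List Nat), 2 ≤ P →
    primes = (List.range (Nat.count Nat.Prime P)).map (Nat.nth Nat.Prime) →
    Nat.count Nat.Prime P ≤ m → m ≤ Nat.count Nat.Prime (P + fuel) →
    bLoop fuel m P primes = (List.range m).map (Nat.nth Nat.Prime) := by
  induction fuel with
  | zero =>
    intro P m primes h2 hpr hle hfuel
    rw [Nat.add_zero] at hfuel
    have : Nat.count Nat.Prime P = m := by omega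
    rw [bLoop, hpr, this]
  | succ f ih =>
    intro P m primes h2 hpr hle hfuel
    rw [bLoop]
    have hlen : primes.length = Nat.count Nat.Prime P := by rw [hpr]; simp
    by_cases hlt : primes.length < m
    · rw [if_pos hlt]
      by_cases hpm : P.Prime
      · have hb : bIsPrime P = true := (pvBIsPrimeEq P h2).2 hpm
        rw [hb, if_pos rfl]
        apply ih (P + 1) m _ (by omega)
        · rw [Nat.count_succ, if_pos hpm, List.range_succ, List.map_append, ← hpr]
          simp only [List.map_cons, List.map_nil]
          congr 1
          rw [show Nat.count Nat.Prime P = Nat.count Nat.Prime (Nat.nth Nat.Prime (Nat.count Nat.Prime P)) from ?_]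
          · simp [Nat.nth_count hpm]
          · rw [Nat.nth_count hpm]
        · rw [Nat.count_succ, if_pos hpm]; omega
        · have : P + 1 + f = P + (f + 1) := by omega
          rw [this]; exact hfuel
      · have hb : bIsPrime P = false := by
          rcases Bool.eq_false_or_eq_true (bIsPrime P) with h | h
          · exact absurd ((pvBIsPrimeEq P h2).1 h) hpm
          · exact h
        rw [hb]
        simp only [Bool.false_eq_true, if_false]
        apply ih (P + 1) m _ (by omega)
        · rw [Nat.count_succ, if_neg hpm, Nat.add_zero, hpr]
        · rw [Nat.count_succ, if_neg hpm]; omega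
        · have : P + 1 + f = P + (f + 1) := by omega
          rw [this]; exact hfuel
    · rw [if_neg hlt, hpr]
      have : Nat.count Nat.Prime P = m := by omega
      rw [this]

theorem pvBFirstPrimesEq (m : Nat) :
    bFirstPrimes m = (List.range m).map (Nat.nth Nat.Prime) := by
  unfold bFirstPrimes
  apply pvBLoopSpec _ _ _ _ (by norm_num)
  · decide
  · have : Nat.count Nat.Prime 2 = 0 := by decide
    omega
  · rcases Nat.eq_zero_or_pos m with rfl | hm
    · omega
    · have h1 : Nat.count Nat.Prime (Nat.nth Nat.Prime (m - 1) + 1) = m := by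
        rw [Nat.count_nth_succ_of_infinite Nat.infinite_setOf_prime]; omega
      have h2 : Nat.nth Nat.Prime (m - 1) ≤ 2 ^ (m - 1 + 1) := pvNthPrimeLeTwoPow _
      have h3 : (2 : Nat) ^ (m - 1 + 1) ≤ 2 ^ (m + 1) :=
        Nat.pow_le_pow_right (by norm_num) (by omega)
      have hmono : Nat.count Nat.Prime (Nat.nth Nat.Prime (m - 1) + 1)
          ≤ Nat.count Nat.Prime (2 + 2 ^ (m + 1)) := Nat.count_monotone _ (by omega)
      omega

-- ---- shape of A's in-place matrix fill ----

theorem pvFill2 {α : Type} (d : α) (g : Nat → α → α) :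
    ∀ (m a : Nat) (r : List α), a + m ≤ r.length →
    (List.range' a m).foldl (fun r j => r.set j (g j (r.getD j d))) r
      = r.take a ++ (List.range' a m).map (fun j => g j (r.getD j d)) ++ r.drop (a + m) := by
  intro m
  induction m with
  | zero =>
    intro a r h
    simp [List.take_append_drop]
  | succ m ih =>
    intro a r h
    rw [List.range'_succ, List.foldl_cons, List.map_cons]
    set x := g a (r.getD a d) with hx
    have hlen : (r.set a x).length = r.length := by simp
    rw [ih (a + 1) (r.set a x) (by omega)]
    have hgd : ∀ j, j ≠ a → (r.set a x).getD j d = r.getD j d := by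
      intro j hj
      simp [List.getD_eq_getElem?_getD, List.getElem?_set_ne (by omega : a ≠ j)]
    have hmap : (List.range' (a + 1) m).map (fun j => g j ((r.set a x).getD j d))
        = (List.range' (a + 1) m).map (fun j => g j (r.getD j d)) := by
      apply List.map_congr_left
      intro j hj
      rw [List.mem_range'_1] at hj
      rw [hgd j (by omega)]
    have htake : (r.set a x).take (a + 1) = r.take a ++ [x] := by
      rw [List.take_set]
      have h1 : r.take (a + 1) = r.take a ++ [r.getD a d] := by
        rw [List.getD_eq_getElem?_getD, List.take_add_one]
        congr 1
        have : a < r.length := by omega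
        simp [List.getElem?_eq_getElem this]
      rw [h1]
      have h2 : (r.take a).length = a := by simp; omega
      rw [List.set_append_right _ _ (by omega)]
      simp [h2]
    have hdrop : (r.set a x).drop (a + 1 + m) = r.drop (a + (m + 1)) := by
      rw [List.drop_set_of_lt (by omega)]
      congr 1
      omega
    rw [hmap, htake, hdrop]
    simp [List.append_assoc]

-- A's inner loop touches only row i of the accumulator
theorem pvFoldlSetGetD {ι ρ : Type} (dr : ρ) (u : ι → ρ → ρ) (i : Nat) :
    ∀ (js : List ι) (C : List ρ),
    js.foldl (fun C j => C.set i (u j (C.getD i dr))) C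
      = C.set i (js.foldl (fun r j => u j r) (C.getD i dr)) := by
  intro js
  induction js with
  | nil =>
    intro C
    by_cases hi : i < C.length
    · simp [List.getD_eq_getElem?_getD, List.getElem?_eq_getElem hi, List.set_getElem_self]
    · rw [List.foldl_nil, List.set_eq_of_length_le (by omega)]
  | cons j js ih =>
    intro C
    rw [List.foldl_cons, List.foldl_cons, ih]
    by_cases hi : i < C.length
    · have h1 : (C.set i (u j (C.getD i dr))).getD i dr = u j (C.getD i dr) := by
        simp [List.getD_eq_getElem?_getD, List.getElem?_set_self (by simpa using hi)]
      rw [h1, List.set_set]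
    · have hC : C.set i (u j (C.getD i dr)) = C := List.set_eq_of_length_le (by omega)
      rw [hC, List.set_eq_of_length_le (by omega), List.set_eq_of_length_le (by omega)]

-- running max over rows bounds every scanned element
theorem pvMaxFold (N : Nat) :
    ∀ (l : List (List Int)) (a : Int),
      a ≤ l.foldl (fun m row => (row.take N).foldl max m) a
      ∧ ∀ row ∈ l, ∀ x ∈ row.take N, x ≤ l.foldl (fun m row => (row.take N).foldl max m) a := by
  intro l
  induction l with
  | nil => intro a; simp
  | cons r t ih =>
    intro a
    rw [List.foldl_cons]
    set a' := (r.take N).foldl max a with ha'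
    refine ⟨le_trans (PySem.List.le_foldl_max _ _).1 (ih a').1, ?_⟩
    intro row hrow x hx
    rcases List.mem_cons.1 hrow with rfl | hrow
    · exact le_trans ((PySem.List.le_foldl_max _ _).2 x hx) (ih a').1
    · exact (ih a').2 row hrow x hx

-- the value A writes into coors[i][j]
def pvEnt (Sn : List (List Int)) (i j : Nat) : Int :=
  (-1) ^ (|(Sn.getD i []).getD j 0 - (j : Int)|).toNat *
    (get_Prime ((Sn.getD i []).getD j 0) + |(Sn.getD i []).getD j 0 - (j : Int)|) ^ ((j : Int) + 1).toNat

theorem pvGetCoorsEq (Sn : List (List Int)) (n : Int) :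
    get_Coors Sn n = (List.range Sn.length).map (fun i =>
      (List.range n.toNat).map (fun j => pvEnt Sn i j)) := by
  unfold get_Coors
  simp only [PySem.List.pyRange_zero, List.foldl_map,
    List.map_map, PySem.List.pyGetD_natCast, Int.toNat_natCast]
  show List.foldl
      (fun C i =>
        List.foldl (fun C j => C.set i ((C.getD i []).set j (pvEnt Sn i j))) C (List.range n.toNat))
      (List.map ((fun _ => List.replicate n.toNat 0) ∘ fun k : Nat => (k : Int)) (List.range Sn.length))
      (List.range Sn.length) = _
  have hinit : (List.map ((fun _ => List.replicate n.toNat (0 : Int)) ∘ fun k : Nat => (k : Int)) (List.range Sn.length))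
      = List.replicate Sn.length (List.replicate n.toNat 0) := by
    simp [Function.comp_def]
  rw [hinit]
  rw [show (fun (C : List (List Int)) (i : Nat) =>
        List.foldl (fun C j => C.set i ((C.getD i []).set j (pvEnt Sn i j))) C (List.range n.toNat))
      = fun C i => C.set i (List.foldl (fun r j => r.set j (pvEnt Sn i j)) (C.getD i []) (List.range n.toNat))
    from funext fun C => funext fun i =>
      pvFoldlSetGetD [] (fun (j : Nat) (r : List Int) => r.set j (pvEnt Sn i j)) i (List.range n.toNat) C]
  simp only [List.range_eq_range']
  rw [pvFill2 ([] : List Int)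
    (fun i r => List.foldl (fun r j => r.set j (pvEnt Sn i j)) r (List.range' 0 n.toNat))
    Sn.length 0 (List.replicate Sn.length (List.replicate n.toNat 0)) (by simp)]
  simp only [List.take_zero, List.nil_append, Nat.zero_add, List.drop_replicate,
    Nat.sub_self, List.replicate_zero, List.append_nil]
  apply List.map_congr_left
  intro i hi
  rw [List.mem_range'_1] at hi
  have hgd : (List.replicate Sn.length (List.replicate n.toNat (0 : Int))).getD i []
      = List.replicate n.toNat 0 := by
    rw [List.getD_eq_getElem?_getD, List.getElem?_replicate, if_pos (by omega)]
    rfl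
  rw [hgd]
  rw [pvFill2 (0 : Int) (fun j _ => pvEnt Sn i j) n.toNat 0 (List.replicate n.toNat 0) (by simp)]
  simp

-- running maximum of the scanned entries (B's first pass), in take-form
def pvM (Sn : List (List Int)) (n : Int) : Int :=
  Sn.foldl (fun m row => (row.take n.toNat).foldl max m) 0

def pvBEnt (Sn : List (List Int)) (n : Int) (row : List Int) (j : Nat) : Int :=
  (-1) ^ (|row.getD j 0 - (j : Int)|).toNat *
    (PySem.List.pyGetD ((bFirstPrimes (pvM Sn n).toNat).map (fun p : Nat => (p : Int)))
        (row.getD j 0 - 1) 0 + |row.getD j 0 - (j : Int)|) ^ ((j : Int) + 1).toNat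

theorem pvGetCoorsAltEq (Sn : List (List Int)) (n : Int) :
    get_Coors_alt Sn n
      = Sn.map (fun row => (List.range n.toNat).map (fun j => pvBEnt Sn n row j)) := by
  unfold get_Coors_alt
  have hmax : (fun (m v : Int) => if v > m then v else m) = max := by
    funext m v
    by_cases h : v > m
    · rw [if_pos h, max_eq_right h.le]
    · rw [if_neg h, max_eq_left (by omega)]
  have hslice : (fun (m : Int) (row : List Int) =>
        (PySem.List.slice row none (some (max n 0))).foldl (fun m v => if v > m then v else m) m)
      = fun m row => (row.take n.toNat).foldl max m := by
    funext m row
    rw [PySem.List.slice_to row (le_max_right n 0), hmax]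
    congr 2
    omega
  rw [hslice]
  simp only [PySem.List.pyRange_zero, List.map_map, Function.comp_def,
    PySem.List.pyGetD_natCast]
  rfl

-- ===== VERDICT (by name: the statement is the Claim_ definition above) =====
theorem get_Coors_spec : Claim_equal_get_Coors := by
  intro Sn n hDom hPre
  unfold Spec_get_Coors
  rw [pvGetCoorsEq, pvGetCoorsAltEq]
  apply List.ext_getElem
  · simp
  · intro i h1 h2
    have hi : i < Sn.length := by simpa using h2
    simp only [List.getElem_map, List.getElem_range, List.length_map, List.length_range] at h1 h2 ⊢
    have hrowD : Sn.getD i [] = Sn[i] := by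
      rw [List.getD_eq_getElem?_getD, List.getElem?_eq_getElem h2]
      rfl
    apply List.ext_getElem
    · simp
    · intro j hj1 hj2
      have hjN : j < n.toNat := by simpa using hj2
      simp only [List.getElem_map, List.getElem_range, List.length_map, List.length_range] at hj1 hj2 ⊢
      have hrow : Sn[i] ∈ Sn := List.getElem_mem hi
      obtain ⟨hlen, hpos⟩ := hPre Sn[i] hrow
      have hjrow : j < Sn[i].length := by omega
      have hv : Sn[i].getD j 0 = Sn[i][j] := by
        rw [List.getD_eq_getElem?_getD, List.getElem?_eq_getElem hjrow]
        rfl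
      set v : Int := Sn[i][j] with hvdef
      have hvtake : v ∈ Sn[i].take n.toNat := by
        have hjt : j < (Sn[i].take n.toNat).length := by simp; omega
        have : (Sn[i].take n.toNat)[j] = v := by
          rw [List.getElem_take]
        rw [← this]
        exact List.getElem_mem hjt
      have hv1 : 1 ≤ v := hpos v hvtake
      have hvM : v ≤ pvM Sn n := (pvMaxFold n.toNat Sn 0).2 Sn[i] hrow v hvtake
      -- A entry = B entry
      unfold pvEnt pvBEnt
      rw [hrowD, hv]
      rw [pvGetPrimeEq v hv1]
      have hMv : v.toNat ≤ (pvM Sn n).toNat := by omega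
      rw [show v - 1 = ((v.toNat - 1 : Nat) : Int) by omega]
      rw [PySem.List.pyGetD_natCast, pvBFirstPrimesEq, List.map_map]
      have hidx : v.toNat - 1 < (pvM Sn n).toNat := by omega
      rw [List.getD_eq_getElem?_getD, List.getElem?_eq_getElem (by simpa using hidx)]
      simp
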